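-- pv_equiv track=rewrite | github.com/Sainath2705/Retail_store_data_analysis | app/analytics.py | select_date_column
-- ===== SOURCE A (Python) =====
-- DATE_TOKENS = ("date", "time", "day", "month", "year")
--
-- def select_date_column(date_columns):
--     if not date_columns:
--         return None
--
--     ranked_columns = sorted(
--         date_columns,
--         key=lambda value: (
--             not any(token in normalize_name(value) for token in DATE_TOKENS),
--             value,
--         ),
--     )
--     return ranked_columns[0]
--
-- def normalize_name(value):
--     return str(value).strip().lower().replace("-", " ").replace("_", " ")
-- ===== SOURCE B (Python) =====
-- DATE_TOKENS = ("date", "time", "day", "month", "year")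
--
-- def select_date_column(date_columns):
--     if not date_columns:
--         return None
--     matches = [c for c in date_columns
--                if any(token in normalize_name(c) for token in DATE_TOKENS)]
--     pool = matches if matches else date_columns
--     return min(pool)
--
-- def normalize_name(value):
--     return str(value).strip().lower().replace("-", " ").replace("_", " ")
-- ===== Notes on version B (the rewrite author's own statement) =====
-- stated objective: simpler
-- what changed: Replaces the single composite-key sort (tuple key of match-flag and value, then take element 0) by an explicit filter of token-matching columns, a fallback to the full list, and a plain min over the chosen pool.
import Mathlib
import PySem

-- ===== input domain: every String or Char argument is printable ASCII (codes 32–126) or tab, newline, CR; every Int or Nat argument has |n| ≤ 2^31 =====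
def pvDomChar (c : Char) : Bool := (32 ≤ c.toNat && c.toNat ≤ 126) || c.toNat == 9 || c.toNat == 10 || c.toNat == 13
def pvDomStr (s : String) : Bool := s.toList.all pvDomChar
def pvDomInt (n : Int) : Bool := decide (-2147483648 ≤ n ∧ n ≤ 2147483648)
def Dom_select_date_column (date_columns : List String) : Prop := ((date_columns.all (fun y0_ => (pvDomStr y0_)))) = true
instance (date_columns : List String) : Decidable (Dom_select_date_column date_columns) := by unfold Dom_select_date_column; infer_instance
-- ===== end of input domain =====

-- B replaces A's composite-key sort (match-flag, value) + take-first by an explicit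
-- filter of token-matching columns with a fallback to the full list and a plain min (simpler decomposition).


-- ===== PORT A =====
def DATE_TOKENS : List String := ["date", "time", "day", "month", "year"]

def normalize_name (value : String) : String :=
  PySem.Str.replace (PySem.Str.replace (PySem.Str.lower (PySem.Str.strip value)) "-" " ") "_" " "

-- any(token in normalize_name(value) for token in DATE_TOKENS)
def hasDateToken (value : String) : Bool :=
  DATE_TOKENS.any (fun token => PySem.Str.isIn token (normalize_name value))

def select_date_column (date_columns : List String) : Option String :=
  if date_columns = [] then none
  else
    let ranked_columns :=
      PySem.List.sorted2 date_columns (fun value => !hasDateToken value) (fun value => value)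
    PySem.List.pyGet? ranked_columns 0

-- ===== PORT B =====
def select_date_column_alt (date_columns : List String) : Option String :=
  if date_columns = [] then none
  else
    let ms := date_columns.filter (fun c => hasDateToken c)
    let pool := if ms = [] then date_columns else ms
    PySem.List.min? pool (fun x => x)

-- ===== PRECONDITION & SPEC =====
def Spec_select_date_column (date_columns : List String) (out : Option String) : Prop := out = select_date_column_alt date_columns
instance (date_columns : List String) (out : Option String) : Decidable (Spec_select_date_column date_columns out) := by unfold Spec_select_date_column; infer_instance

-- ===== CLAIM (what is proved, stated in full; the proofs are below) =====
def Claim_equal_select_date_column : Prop := ∀ (date_columns : List String), Dom_select_date_column date_columns → Spec_select_date_column date_columns (select_date_column date_columns)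

-- ===== LEMMAS AND PROOFS =====

-- the lexicographic key A sorts by, as an embedding into a linear order
def lexKey (v : String) : Bool ×ₗ String := toLex (!hasDateToken v, v)

lemma lexKey_inj {a b : String} (h : lexKey a = lexKey b) : a = b := by
  have := congrArg (fun p => (ofLex p).2) h
  simpa [lexKey] using this

-- A's insertion-sort "before" test is exactly the strict order on lexKey
def bf (a b : String) : Bool :=
  decide ((!hasDateToken a) < (!hasDateToken b)) ||
    (!decide ((!hasDateToken b) < (!hasDateToken a)) && decide (a < b))

lemma bf_iff (a b : String) : bf a b = true ↔ lexKey a < lexKey b := by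
  cases hA : hasDateToken a <;> cases hB : hasDateToken b <;>
    simp [bf, lexKey, Prod.Lex.toLex_lt_toLex, hA, hB]

lemma sorted2_eq_foldl (xs : List String) :
    PySem.List.sorted2 xs (fun v => !hasDateToken v) (fun v => v) =
      xs.foldl (fun acc x => PySem.List.insertBy bf x acc) [] := rfl

-- head of insertBy
lemma head_insertBy (x : String) (acc : List String) :
    PySem.List.insertBy bf x acc =
      (match acc with
       | [] => [x]
       | y :: ys => if bf x y then x :: y :: ys else y :: PySem.List.insertBy bf x ys) := by
  cases acc <;> rfl

-- invariant: the head of the accumulator is lexKey-minimal in it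
lemma fold_head_min (xs : List String) :
    ∀ acc : List String,
      (∀ h t, acc = h :: t → ∀ y ∈ acc, lexKey h ≤ lexKey y) →
      ∀ h t, xs.foldl (fun a x => PySem.List.insertBy bf x a) acc = h :: t →
        ∀ y ∈ h :: t, lexKey h ≤ lexKey y := by
  induction xs with
  | nil =>
    intro acc hinv h t hfold y hy
    have hacc : acc = h :: t := by simpa using hfold
    exact hinv h t hacc y (hacc ▸ hy)
  | cons x xs ih =>
    intro acc hinv h t hfold
    refine ih (PySem.List.insertBy bf x acc) ?_ h t (by simpa using hfold)
    intro h' t' hacc' y hy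
    cases acc with
    | nil =>
      rw [head_insertBy] at hacc' hy
      simp at hacc' hy
      simp [hacc'.1, hy]
    | cons a as =>
      rw [head_insertBy] at hacc' hy
      by_cases hb : bf x a = true
      · simp [hb] at hacc' hy
        have hx : lexKey x < lexKey a := (bf_iff x a).mp hb
        have hamin : ∀ y ∈ a :: as, lexKey a ≤ lexKey y := hinv a as rfl
        rcases hy with rfl | rfl | hy
        · simp [hacc'.1]
        · exact hacc'.1 ▸ le_of_lt hx
        · exact hacc'.1 ▸ le_trans (le_of_lt hx) (hamin y (List.mem_cons_of_mem a hy))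
      · simp [hb] at hacc' hy
        have hamin : ∀ y ∈ a :: as, lexKey a ≤ lexKey y := hinv a as rfl
        have hax : lexKey a ≤ lexKey x := by
          rcases lt_trichotomy (lexKey a) (lexKey x) with hlt | heq | hgt
          · exact le_of_lt hlt
          · exact le_of_eq heq
          · exact absurd ((bf_iff x a).mpr hgt) (by simpa using hb)
        rcases hy with rfl | hy
        · simp [hacc'.1]
        · have := PySem.List.mem_insertBy (before := bf) (x := x) (ys := as) (y := y) |>.mp
            (by simpa using hy)
          rcases this with rfl | hy'
          · exact hacc'.1 ▸ hax
          · exact hacc'.1 ▸ hamin y (List.mem_cons_of_mem a hy')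

-- A's head is lexKey-minimal among date_columns and a member of it
lemma sorted2_head_min (xs : List String) (h : String) (t : List String)
    (hs : PySem.List.sorted2 xs (fun v => !hasDateToken v) (fun v => v) = h :: t) :
    h ∈ xs ∧ ∀ y ∈ xs, lexKey h ≤ lexKey y := by
  have hperm : (PySem.List.sorted2 xs (fun v => !hasDateToken v) (fun v => v)).Perm xs :=
    PySem.List.sorted2_perm xs _ _ false
  rw [hs] at hperm
  have hmem : ∀ y, y ∈ xs ↔ y ∈ h :: t := fun y => (hperm.mem_iff).symm
  have hmin := fold_head_min xs [] (by simp) h t (by rw [← sorted2_eq_foldl]; exact hs)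
  exact ⟨(hmem h).mpr (by simp), fun y hy => hmin y ((hmem y).mp hy)⟩

-- B's min is also lexKey-minimal among date_columns and a member of it
lemma alt_min_lex (xs : List String) (m : String)
    (hm : PySem.List.min?
        (if xs.filter (fun c => hasDateToken c) = [] then xs
         else xs.filter (fun c => hasDateToken c)) (fun x => x) = some m) :
    m ∈ xs ∧ ∀ y ∈ xs, lexKey m ≤ lexKey y := by
  set ms := xs.filter (fun c => hasDateToken c) with hmdef
  by_cases hf : ms = []
  · rw [if_pos hf] at hm
    have hmem := PySem.List.min?_mem hm
    have hmin := PySem.List.min?_isMin hm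
    refine ⟨hmem, fun y hy => ?_⟩
    have hky : hasDateToken y = false := by
      by_contra hc
      have : y ∈ ms := by
        rw [hmdef]; exact List.mem_filter.mpr ⟨hy, by simpa using hc⟩
      simp [hf] at this
    have hkm : hasDateToken m = false := by
      by_contra hc
      have : m ∈ ms := by
        rw [hmdef]; exact List.mem_filter.mpr ⟨hmem, by simpa using hc⟩
      simp [hf] at this
    simp [lexKey, Prod.Lex.toLex_le_toLex, hky, hkm, hmin y hy]
  · rw [if_neg hf] at hm
    have hmem := PySem.List.min?_mem hm
    have hmin := PySem.List.min?_isMin hm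
    have hkm : hasDateToken m = true := (List.mem_filter.mp (hmdef ▸ hmem)).2
    refine ⟨(List.mem_filter.mp (hmdef ▸ hmem)).1, fun y hy => ?_⟩
    by_cases hky : hasDateToken y = true
    · have hy' : y ∈ ms := by rw [hmdef]; exact List.mem_filter.mpr ⟨hy, hky⟩
      simp [lexKey, Prod.Lex.toLex_le_toLex, hkm, hky, hmin y hy']
    · simp only [Bool.not_eq_true] at hky
      simp [lexKey, Prod.Lex.toLex_le_toLex, hkm, hky]

lemma min?_ne_none (xs : List String) (hne : xs ≠ []) :
    PySem.List.min? xs (fun x => x) ≠ none := by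
  intro hc
  exact hne ((PySem.List.min?_eq_none_iff _ _).mp hc)

-- ===== VERDICT (by name: the statement is the Claim_ definition above) =====
theorem select_date_column_spec : Claim_equal_select_date_column := by
  intro date_columns _
  unfold Spec_select_date_column select_date_column select_date_column_alt
  by_cases hne : date_columns = []
  · simp [hne]
  · simp only [if_neg hne]
    -- A's side: sorted2 is nonempty, so it has a head
    have hsne : PySem.List.sorted2 date_columns (fun v => !hasDateToken v) (fun v => v) ≠ [] := by
      intro hc
      have hperm := PySem.List.sorted2_perm date_columns
        (fun v => !hasDateToken v) (fun v => v) false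
      rw [hc] at hperm
      exact hne (hperm.symm.eq_nil)
    obtain ⟨h, t, hs⟩ := List.exists_cons_of_ne_nil hsne
    -- B's side: the pool is nonempty, so min? returns some m
    have hpne : (if date_columns.filter (fun c => hasDateToken c) = [] then date_columns
        else date_columns.filter (fun c => hasDateToken c)) ≠ [] := by
      split <;> simp_all
    obtain ⟨m, hm⟩ := Option.ne_none_iff_exists'.mp (min?_ne_none _ hpne)
    have ⟨hmemA, hminA⟩ := sorted2_head_min date_columns h t hs
    have ⟨hmemB, hminB⟩ := alt_min_lex date_columns m hm
    have heq : h = m :=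
      lexKey_inj (le_antisymm (hminA m hmemB) (hminB h hmemA))
    rw [hs, hm, heq]
    simp [PySem.List.pyGet?, PySem.List.pyIdx?]
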